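-- pv_equiv track=rewrite | github.com/qyuan2/TAGAPT_generated_samples | Find_hub_process_test.py | find_closest_process_index
-- ===== SOURCE A (Python) =====
-- def find_closest_process_index(entity_list,index):
--     closest_index1 = -1
--     closest_index2 = -1
--     for i1 in range(index - 1, -1, -1):
--         if entity_list[i1] in ["MP","TP"]:
--             closest_index1 = i1
--             break
--     for i2 in range(index + 1, len(entity_list)):
--         if entity_list[i2] in ["MP","TP"]:
--             closest_index2 = i2
--             break
--     if closest_index1 == -1 and closest_index2 == -1:
--         raise Exception("not found index")
--     elif closest_index1 == -1:
--         closest_index = closest_index2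
--     elif closest_index2 == -1:
--         closest_index = closest_index1
--     elif ((index-closest_index1) < (closest_index2-index)) and (closest_index1*closest_index2 >= 0):
--         closest_index = closest_index1
--     else:
--         closest_index = closest_index2
--     return closest_index
-- ===== SOURCE B (Python) =====
-- def find_closest_process_index(entity_list, index):
--     n = len(entity_list)
--     for d in range(1, max(index, n - 1 - index) + 1):
--         r = index + d
--         if 0 <= r < n and entity_list[r] in ("MP", "TP"):
--             return r
--         l = index - d
--         if 0 <= l and entity_list[l] in ("MP", "TP"):
--             return l
--     raise Exception("not found index")
-- ===== Notes on version B (the rewrite author's own statement) =====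
-- stated objective: alternative
-- what changed: Replaces A's two full directional scans plus a distance-comparison decision block by a single outward-expanding loop over distances d=1,2,... that tests index+d before index-d and returns the first match, which directly encodes the tie-goes-right rule.
-- outside the precondition, e.g. on find_closest_process_index(['x', 'MP', 'x'], -3): A returns -2, B returns 1
import Mathlib
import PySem

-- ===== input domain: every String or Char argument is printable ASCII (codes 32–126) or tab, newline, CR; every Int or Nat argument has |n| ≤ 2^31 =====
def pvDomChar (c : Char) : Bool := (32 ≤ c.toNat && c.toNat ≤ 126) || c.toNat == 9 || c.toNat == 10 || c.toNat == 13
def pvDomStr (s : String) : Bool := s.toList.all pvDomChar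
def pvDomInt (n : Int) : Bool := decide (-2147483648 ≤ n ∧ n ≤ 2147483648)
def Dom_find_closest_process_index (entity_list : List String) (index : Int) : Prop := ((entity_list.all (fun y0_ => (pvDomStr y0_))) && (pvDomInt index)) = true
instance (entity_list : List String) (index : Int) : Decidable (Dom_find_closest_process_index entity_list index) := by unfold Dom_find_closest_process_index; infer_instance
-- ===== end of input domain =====

-- B replaces A's two directional scans plus a distance-comparison block by a single
-- outward-expanding loop (right probe before left probe at each distance); alternative
-- decomposition, same O(n) cost. Equivalence is proved on Pre_ (see its comment).


-- the test «entity_list[i] in ["MP","TP"]» both Pythons perform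
def pvQ (entity_list : List String) (i : Int) : Bool :=
  ["MP", "TP"].contains (PySem.List.pyGetD entity_list i "")

-- ===== PORT A =====
-- A's break-loop: 'closest = -1; for i in idxs: if entity_list[i] in ["MP","TP"]: closest = i; break'
def pvFirstMatch (entity_list : List String) (idxs : List Int) : Int :=
  idxs.foldl (fun acc i => if acc = -1 ∧ pvQ entity_list i then i else acc) (-1)

-- A's if/elif decision block on the two loop results
def pvCombineA (index closest_index1 closest_index2 : Int) : Int :=
  if closest_index1 = -1 ∧ closest_index2 = -1 then -1   -- Python raises Exception here; outside Pre_
  else if closest_index1 = -1 then closest_index2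
  else if closest_index2 = -1 then closest_index1
  else if (index - closest_index1) < (closest_index2 - index) ∧ closest_index1 * closest_index2 ≥ 0 then closest_index1
  else closest_index2

def find_closest_process_index (entity_list : List String) (index : Int) : Int :=
  pvCombineA index
    (pvFirstMatch entity_list (PySem.List.pyRange (index - 1) (-1) (-1)))
    (pvFirstMatch entity_list (PySem.List.pyRange (index + 1) (PySem.List.len entity_list) 1))

-- ===== PORT B =====
-- one iteration of B's loop body at distance d: right side first, then left side
def pvProbe (entity_list : List String) (index d : Int) : Option Int :=
  if 0 ≤ index + d ∧ index + d < PySem.List.len entity_list ∧ pvQ entity_list (index + d) then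
    some (index + d)
  else if 0 ≤ index - d ∧ pvQ entity_list (index - d) then
    some (index - d)
  else none

def find_closest_process_index_alt (entity_list : List String) (index : Int) : Int :=
  ((PySem.List.pyRange 1 (max index (PySem.List.len entity_list - 1 - index) + 1) 1).findSome?
      (pvProbe entity_list index)).getD 0   -- none = Python raises Exception; outside Pre_

-- ===== PRECONDITION & SPEC =====
-- Pre_ restricts to the natural domain 0 ≤ index ≤ len(entity_list) and requires an 'MP'/'TP'
-- entry at a position other than index: on no-match inputs and on index > len A raises
-- (Exception / IndexError), and negative indices are outside the function's natural domain
-- (positions in entity_list), where A's Python negative-index wraparound reads the list twice.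
def Pre_find_closest_process_index (entity_list : List String) (index : Int) : Prop :=
  0 ≤ index ∧ index ≤ entity_list.length ∧
  ∃ i : Nat, i < entity_list.length ∧ (i : Int) ≠ index ∧
    (entity_list.getD i "") ∈ (["MP", "TP"] : List String)
instance (entity_list : List String) (index : Int) : Decidable (Pre_find_closest_process_index entity_list index) := by unfold Pre_find_closest_process_index; infer_instance

def pvWitness_find_closest_process_index : List String × Int := (["MP", "x"], 1)

def Spec_find_closest_process_index (entity_list : List String) (index : Int) (out : Int) : Prop := out = find_closest_process_index_alt entity_list index
instance (entity_list : List String) (index : Int) (out : Int) : Decidable (Spec_find_closest_process_index entity_list index out) := by unfold Spec_find_closest_process_index; infer_instance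

-- ===== CLAIM (what is proved, stated in full; the proofs are below) =====
def Claim_equal_find_closest_process_index : Prop := ∀ (entity_list : List String) (index : Int), Dom_find_closest_process_index entity_list index → Pre_find_closest_process_index entity_list index → Spec_find_closest_process_index entity_list index (find_closest_process_index entity_list index)

-- ===== LEMMAS AND PROOFS =====

-- a break-loop fold with a found sentinel stays put once set
theorem pvFold_stay (entity_list : List String) (xs : List Int) (acc : Int) (h : acc ≠ -1) :
    xs.foldl (fun acc i => if acc = -1 ∧ pvQ entity_list i then i else acc) acc = acc := by
  induction xs with
  | nil => rfl
  | cons x xs ih =>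
    rw [List.foldl_cons, if_neg (fun hc => h hc.1)]
    exact ih

-- A's break-loop fold is the first match (when -1 is not an element)
theorem pvFirstMatch_eq_find? (entity_list : List String) (idxs : List Int)
    (h : ∀ i ∈ idxs, i ≠ -1) :
    pvFirstMatch entity_list idxs = ((idxs.find? (pvQ entity_list)).getD (-1)) := by
  induction idxs with
  | nil => rfl
  | cons x xs ih =>
    have hx : x ≠ -1 := h x (by simp)
    simp only [pvFirstMatch, List.foldl_cons, List.find?_cons]
    by_cases hq : pvQ entity_list x = true
    · rw [hq, if_pos (by simp), pvFold_stay entity_list xs x hx]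
      rfl
    · rw [if_neg (fun hc => hq hc.2)]
      rw [Bool.not_eq_true] at hq
      rw [hq]
      exact ih (fun i hi => h i (List.mem_cons_of_mem _ hi))

-- first match on the descending range [m-1, …, 0] is the greatest match below m
theorem pvFindDesc (entity_list : List String) :
    ∀ (m : Nat) (c : Int),
      (PySem.List.pyRange ((m : Int) - 1) (-1) (-1)).find? (pvQ entity_list) = some c →
      ∀ j : Int, c < j → j < (m : Int) → pvQ entity_list j = false := by
  intro m
  induction m with
  | zero =>
    intro c hc
    rw [PySem.List.pyRange_neg_one_eq_nil (by norm_num)] at hc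
    simp at hc
  | succ m ih =>
    intro c hc
    rw [show (((m + 1 : Nat) : Int) - 1) = (m : Int) by push_cast; ring,
      PySem.List.pyRange_neg_one_cons (by omega), List.find?_cons] at hc
    by_cases hq : pvQ entity_list (m : Int) = true
    · rw [hq] at hc
      cases hc
      intro j h1 h2
      push_cast at h2
      omega
    · rw [Bool.not_eq_true] at hq
      rw [hq] at hc
      intro j h1 h2
      push_cast at h2
      rcases lt_or_ge j (m : Int) with hj | hj
      · exact ih c (by rwa [show ((m : Nat) : Int) - 1 = (m : Int) - 1 from rfl] at hc) j h1 hj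
      · have : j = (m : Int) := by omega
        rw [this]; exact hq

-- first match on the ascending range [a, …, a+m-1] is the least match in it
theorem pvFindAsc (entity_list : List String) :
    ∀ (m : Nat) (a c : Int),
      (PySem.List.pyRange a (a + (m : Int)) 1).find? (pvQ entity_list) = some c →
      ∀ j : Int, a ≤ j → j < c → pvQ entity_list j = false := by
  intro m
  induction m with
  | zero =>
    intro a c hc
    rw [PySem.List.pyRange_one_eq_nil (by omega)] at hc
    simp at hc
  | succ m ih =>
    intro a c hc
    rw [PySem.List.pyRange_one_cons (by push_cast; omega), List.find?_cons] at hc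
    by_cases hq : pvQ entity_list a = true
    · rw [hq] at hc
      cases hc
      intro j h1 h2
      omega
    · rw [Bool.not_eq_true] at hq
      rw [hq] at hc
      have hc' : (PySem.List.pyRange (a + 1) ((a + 1) + (m : Int)) 1).find? (pvQ entity_list) = some c := by
        rwa [show (a + 1) + (m : Int) = a + ((m + 1 : Nat) : Int) by push_cast; ring]
      intro j h1 h2
      rcases lt_or_ge j (a + 1) with hj | hj
      · have : j = a := by omega
        rw [this]; exact hq
      · exact ih (a + 1) c hc' j hj h2

-- B's outward loop returns its first hit
theorem pvFindSome?_range_eq_some {α : Type} (f : Int → Option α) (a b d : Int) (v : α)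
    (had : a ≤ d) (hdb : d < b) (hv : f d = some v)
    (hnone : ∀ j : Int, a ≤ j → j < d → f j = none) :
    (PySem.List.pyRange a b 1).findSome? f = some v := by
  rw [PySem.List.pyRange_one_append a d b had (by omega), List.findSome?_append]
  have h1 : (PySem.List.pyRange a d 1).findSome? f = none := by
    rw [List.findSome?_eq_none_iff]
    intro x hx
    rw [PySem.List.mem_pyRange_one] at hx
    exact hnone x hx.1 hx.2
  rw [h1, PySem.List.pyRange_one_cons hdb]
  simp [List.findSome?, hv]

-- ===== VERDICT (by name: the statement is the Claim_ definition above) =====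
theorem find_closest_process_index_spec : Claim_equal_find_closest_process_index := by
  intro entity_list index _hdom hpre
  obtain ⟨hk0, hkn, i0, hi0len, hi0ne, hi0q⟩ := hpre
  unfold Spec_find_closest_process_index
  have hi0len' : ((i0 : Int)) < (entity_list.length : Int) := by exact_mod_cast hi0len
  have hq0 : pvQ entity_list (i0 : Int) = true := by
    simp [pvQ, PySem.List.pyGetD_natCast, List.getD_eq_getElem?_getD] at hi0q ⊢
    simpa [List.getD_eq_getElem?_getD] using hi0q
  have hA1 : pvFirstMatch entity_list (PySem.List.pyRange (index - 1) (-1) (-1))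
      = ((PySem.List.pyRange (index - 1) (-1) (-1)).find? (pvQ entity_list)).getD (-1) := by
    apply pvFirstMatch_eq_find?
    intro i hi
    rw [PySem.List.mem_pyRange_neg_one] at hi
    omega
  have hA2 : pvFirstMatch entity_list (PySem.List.pyRange (index + 1) ((entity_list.length : Int)) 1)
      = ((PySem.List.pyRange (index + 1) ((entity_list.length : Int)) 1).find? (pvQ entity_list)).getD (-1) := by
    apply pvFirstMatch_eq_find?
    intro i hi
    rw [PySem.List.mem_pyRange_one] at hi
    omega
  simp only [find_closest_process_index, find_closest_process_index_alt, PySem.List.len_eq]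
  rw [hA1, hA2]
  set M : Int := max index ((entity_list.length : Int) - 1 - index) with hM
  have hm1 : index ≤ M := hM ▸ le_max_left _ _
  have hm2 : (entity_list.length : Int) - 1 - index ≤ M := hM ▸ le_max_right _ _
  rcases hF1 : (PySem.List.pyRange (index - 1) (-1) (-1)).find? (pvQ entity_list) with _ | c1 <;>
    rcases hF2 : (PySem.List.pyRange (index + 1) ((entity_list.length : Int)) 1).find? (pvQ entity_list) with _ | c2
  · -- both none: contradicts Pre_
    exfalso
    have : pvQ entity_list (i0 : Int) = false := by
      rcases lt_trichotomy ((i0 : Int)) index with h | h | h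
      · have hmem : ((i0 : Int)) ∈ PySem.List.pyRange (index - 1) (-1) (-1) := by
          rw [PySem.List.mem_pyRange_neg_one]; omega
        simpa using List.find?_eq_none.mp hF1 _ hmem
      · exact absurd h hi0ne
      · have hmem : ((i0 : Int)) ∈ PySem.List.pyRange (index + 1) ((entity_list.length : Int)) 1 := by
          rw [PySem.List.mem_pyRange_one]; omega
        simpa using List.find?_eq_none.mp hF2 _ hmem
    rw [hq0] at this
    cases this
  · -- left none, right hit c2: A returns c2; B's first probe to fire is the right one at d = c2 - index
    have hmem2 := List.mem_of_find?_eq_some hF2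
    rw [PySem.List.mem_pyRange_one] at hmem2
    have hq2 : pvQ entity_list c2 = true := List.find?_some hF2
    have hF2' : (PySem.List.pyRange (index + 1) ((index + 1) + ((((entity_list.length : Int)) - index - 1).toNat : Int)) 1).find? (pvQ entity_list) = some c2 := by
      rwa [show (index + 1) + ((((entity_list.length : Int)) - index - 1).toNat : Int) = ((entity_list.length : Int)) from by rw [Int.toNat_of_nonneg (by omega)]; ring]
    have hmin : ∀ j : Int, index + 1 ≤ j → j < c2 → pvQ entity_list j = false :=
      pvFindAsc entity_list _ _ _ hF2'
    have hnone1 : ∀ j : Int, 0 ≤ j → j < index → pvQ entity_list j = false := by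
      intro j h1 h2
      have hmem : j ∈ PySem.List.pyRange (index - 1) (-1) (-1) := by
        rw [PySem.List.mem_pyRange_neg_one]; omega
      simpa using List.find?_eq_none.mp hF1 _ hmem
    have hB : (PySem.List.pyRange 1 (M + 1) 1).findSome? (pvProbe entity_list index) = some c2 := by
      apply pvFindSome?_range_eq_some _ _ _ (c2 - index) _ (by omega) (by omega)
      · simp only [pvProbe, PySem.List.len_eq]
        rw [show index + (c2 - index) = c2 by ring, if_pos ⟨by omega, hmem2.2, hq2⟩]
      · intro j h1 h2
        simp only [pvProbe, PySem.List.len_eq]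
        rw [if_neg (fun hc => by rw [hmin (index + j) (by omega) (by omega)] at hc; exact absurd hc.2.2 (by simp)),
          if_neg (fun hc => by rw [hnone1 (index - j) hc.1 (by omega)] at hc; exact absurd hc.2 (by simp))]
    rw [hB]
    have hc2ne : ¬ (c2 = -1) := by omega
    simp only [pvCombineA, Option.getD_none, Option.getD_some]
    simp [hc2ne]
  · -- left hit c1, right none: A returns c1; B's first probe to fire is the left one at d = index - c1
    have hmem1 := List.mem_of_find?_eq_some hF1
    rw [PySem.List.mem_pyRange_neg_one] at hmem1
    have hq1 : pvQ entity_list c1 = true := List.find?_some hF1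
    have hF1' : (PySem.List.pyRange ((index.toNat : Int) - 1) (-1) (-1)).find? (pvQ entity_list) = some c1 := by
      rwa [Int.toNat_of_nonneg hk0]
    have hmax : ∀ j : Int, c1 < j → j < index → pvQ entity_list j = false := by
      intro j h1 h2
      exact pvFindDesc entity_list index.toNat c1 hF1' j h1 (by rwa [Int.toNat_of_nonneg hk0])
    have hnone2 : ∀ j : Int, index + 1 ≤ j → j < (entity_list.length : Int) → pvQ entity_list j = false := by
      intro j h1 h2
      have hmem : j ∈ PySem.List.pyRange (index + 1) ((entity_list.length : Int)) 1 := by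
        rw [PySem.List.mem_pyRange_one]; omega
      simpa using List.find?_eq_none.mp hF2 _ hmem
    have hB : (PySem.List.pyRange 1 (M + 1) 1).findSome? (pvProbe entity_list index) = some c1 := by
      apply pvFindSome?_range_eq_some _ _ _ (index - c1) _ (by omega) (by omega)
      · simp only [pvProbe, PySem.List.len_eq]
        rw [if_neg (fun hc => by rw [hnone2 (index + (index - c1)) (by omega) hc.2.1] at hc; exact absurd hc.2.2 (by simp))]
        rw [show index - (index - c1) = c1 by ring, if_pos ⟨by omega, hq1⟩]
      · intro j h1 h2
        simp only [pvProbe, PySem.List.len_eq]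
        rw [if_neg (fun hc => by rw [hnone2 (index + j) (by omega) hc.2.1] at hc; exact absurd hc.2.2 (by simp)),
          if_neg (fun hc => by rw [hmax (index - j) (by omega) (by omega)] at hc; exact absurd hc.2 (by simp))]
    rw [hB]
    have hc1ne : ¬ (c1 = -1) := by omega
    simp only [pvCombineA, Option.getD_none, Option.getD_some]
    simp [hc1ne]
  · -- both hits: A compares the distances (tie to the right); B's outward loop does the same
    have hmem1 := List.mem_of_find?_eq_some hF1
    rw [PySem.List.mem_pyRange_neg_one] at hmem1
    have hq1 : pvQ entity_list c1 = true := List.find?_some hF1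
    have hF1' : (PySem.List.pyRange ((index.toNat : Int) - 1) (-1) (-1)).find? (pvQ entity_list) = some c1 := by
      rwa [Int.toNat_of_nonneg hk0]
    have hmax : ∀ j : Int, c1 < j → j < index → pvQ entity_list j = false := by
      intro j h1 h2
      exact pvFindDesc entity_list index.toNat c1 hF1' j h1 (by rwa [Int.toNat_of_nonneg hk0])
    have hmem2 := List.mem_of_find?_eq_some hF2
    rw [PySem.List.mem_pyRange_one] at hmem2
    have hq2 : pvQ entity_list c2 = true := List.find?_some hF2
    have hF2' : (PySem.List.pyRange (index + 1) ((index + 1) + ((((entity_list.length : Int)) - index - 1).toNat : Int)) 1).find? (pvQ entity_list) = some c2 := by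
      rwa [show (index + 1) + ((((entity_list.length : Int)) - index - 1).toNat : Int) = ((entity_list.length : Int)) from by rw [Int.toNat_of_nonneg (by omega)]; ring]
    have hmin : ∀ j : Int, index + 1 ≤ j → j < c2 → pvQ entity_list j = false :=
      pvFindAsc entity_list _ _ _ hF2'
    have hc1ne : ¬ (c1 = -1) := by omega
    have hc2ne : ¬ (c2 = -1) := by omega
    have hprod : c1 * c2 ≥ 0 := mul_nonneg (by omega) (by omega)
    simp only [pvCombineA, Option.getD_some]
    rw [if_neg (fun hc => hc1ne hc.1), if_neg hc1ne, if_neg hc2ne]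
    by_cases hdl : index - c1 < c2 - index
    · rw [if_pos ⟨hdl, hprod⟩]
      have hB : (PySem.List.pyRange 1 (M + 1) 1).findSome? (pvProbe entity_list index) = some c1 := by
        apply pvFindSome?_range_eq_some _ _ _ (index - c1) _ (by omega) (by omega)
        · simp only [pvProbe, PySem.List.len_eq]
          rw [if_neg (fun hc => by rw [hmin (index + (index - c1)) (by omega) (by omega)] at hc; exact absurd hc.2.2 (by simp))]
          rw [show index - (index - c1) = c1 by ring, if_pos ⟨by omega, hq1⟩]
        · intro j h1 h2
          simp only [pvProbe, PySem.List.len_eq]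
          rw [if_neg (fun hc => by rw [hmin (index + j) (by omega) (by omega)] at hc; exact absurd hc.2.2 (by simp)),
            if_neg (fun hc => by rw [hmax (index - j) (by omega) (by omega)] at hc; exact absurd hc.2 (by simp))]
      rw [hB]
      rfl
    · rw [if_neg (fun hc => hdl hc.1)]
      have hB : (PySem.List.pyRange 1 (M + 1) 1).findSome? (pvProbe entity_list index) = some c2 := by
        apply pvFindSome?_range_eq_some _ _ _ (c2 - index) _ (by omega) (by omega)
        · simp only [pvProbe, PySem.List.len_eq]
          rw [show index + (c2 - index) = c2 by ring, if_pos ⟨by omega, hmem2.2, hq2⟩]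
        · intro j h1 h2
          simp only [pvProbe, PySem.List.len_eq]
          rw [if_neg (fun hc => by rw [hmin (index + j) (by omega) (by omega)] at hc; exact absurd hc.2.2 (by simp)),
            if_neg (fun hc => by rw [hmax (index - j) (by omega) (by omega)] at hc; exact absurd hc.2 (by simp))]
      rw [hB]
      rfl
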